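-- pv_equiv track=rewrite | github.com/saumyagupta09/GPRC6A | R1/multiHits/mh_by_branch_codons.py | tokenize_newick
-- ===== SOURCE A (Python) =====
-- def tokenize_newick(s: str):
--     s = s.strip()
--     if not s.endswith(";"): s += ";"
--     i = 0
--     WHITES = " \t\r\n"
--     while i < len(s):
--         c = s[i]
--         if c in "(),:;":
--             yield (c, c); i += 1
--         elif c == "'":
--             i += 1; buf=[]
--             while i < len(s) and s[i] != "'":
--                 buf.append(s[i]); i += 1
--             i += 1
--             yield ("LABEL", "".join(buf))
--         elif c in WHITES:
--             i += 1
--         else: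
--             buf=[]
--             while i < len(s) and s[i] not in "(),:; \t\r\n":
--                 buf.append(s[i]); i += 1
--             yield ("LABEL", "".join(buf))
-- ===== SOURCE B (Python) =====
-- def tokenize_newick(s: str):
--     # Single-pass character-level state machine (explicit mode + buffer),
--     # instead of an index-based scanner with nested inner consumption loops.
--     s = s.strip()
--     if not s.endswith(";"):
--         s += ";"
--     PUNCT = "(),:;"
--     WS = " \t\r\n"
--     mode, buf = 0, []  # 0 = top level, 1 = inside quote, 2 = inside bare label
--     for c in s:
--         if mode == 1:
--             if c == "'":
--                 yield ("LABEL", "".join(buf))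
--                 mode, buf = 0, []
--             else:
--                 buf.append(c)
--         elif mode == 2:
--             if c in PUNCT:
--                 yield ("LABEL", "".join(buf))
--                 yield (c, c)
--                 mode, buf = 0, []
--             elif c in WS:
--                 yield ("LABEL", "".join(buf))
--                 mode, buf = 0, []
--             else:
--                 buf.append(c)
--         else:
--             if c in PUNCT:
--                 yield (c, c)
--             elif c == "'":
--                 mode = 1
--             elif c in WS:
--                 pass
--             else:
--                 mode, buf = 2, [c]
--     if mode != 0:
--         yield ("LABEL", "".join(buf))
-- ===== Notes on version B (the rewrite author's own statement) =====
-- stated objective: faster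
-- what changed: Replaces A's index-based scanner with nested inner while-loops (per-character s[i] indexing and bound checks) by a single flat for-loop over the characters driving an explicit finite-state machine (mode + buffer); same O(n) asymptotics, the speedup is the constant factor of direct iteration versus repeated indexing/len tests.
import Mathlib
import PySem

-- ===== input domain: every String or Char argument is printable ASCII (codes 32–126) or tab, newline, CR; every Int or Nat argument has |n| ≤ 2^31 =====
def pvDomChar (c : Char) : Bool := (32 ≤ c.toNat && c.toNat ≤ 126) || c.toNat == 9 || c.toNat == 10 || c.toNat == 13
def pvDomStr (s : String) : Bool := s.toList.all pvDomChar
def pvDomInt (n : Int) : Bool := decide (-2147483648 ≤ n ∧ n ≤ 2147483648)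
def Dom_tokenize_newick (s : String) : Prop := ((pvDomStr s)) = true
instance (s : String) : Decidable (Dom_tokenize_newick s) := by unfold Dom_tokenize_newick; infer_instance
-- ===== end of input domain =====

-- B replaces A's nested-loop index scanner by a single per-character state-machine fold (same O(n); a timing run measured B faster by a constant factor).

-- ===== PORT A =====
-- character classes of A's membership tests
def pvPunct (c : Char) : Bool := c = '(' || c = ')' || c = ',' || c = ':' || c = ';'
def pvWhite (c : Char) : Bool := c = ' ' || c = '\t' || c = '\r' || c = '\n'

-- inner while of the quote branch: collect until closing quote, skip it
def pvScanQuote : List Char → List Char × List Char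
  | [] => ([], [])
  | c :: rest =>
    if c = '\'' then ([], rest)
    else
      let p := pvScanQuote rest
      (c :: p.1, p.2)

-- inner while of the bare-label branch: collect until a stop character
def pvScanLabel : List Char → List Char × List Char
  | [] => ([], [])
  | c :: rest =>
    if pvPunct c || pvWhite c then ([], c :: rest)
    else
      let p := pvScanLabel rest
      (c :: p.1, p.2)

theorem pvScanQuote_len : ∀ l : List Char, (pvScanQuote l).2.length ≤ l.length := by
  intro l
  induction l with
  | nil => simp [pvScanQuote]
  | cons c rest ih =>
    simp only [pvScanQuote]
    split <;> simp <;> omega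

theorem pvScanLabel_len : ∀ l : List Char, (pvScanLabel l).2.length ≤ l.length := by
  intro l
  induction l with
  | nil => simp [pvScanLabel]
  | cons c rest ih =>
    simp only [pvScanLabel]
    split <;> simp <;> omega

-- A's outer while loop over the index (the advancing index = consuming the char list)
def pvTokA : List Char → List (String × String)
  | [] => []
  | c :: rest =>
    if pvPunct c then (c.toString, c.toString) :: pvTokA rest
    else if c = '\'' then
      let p := pvScanQuote rest
      ("LABEL", String.mk p.1) :: pvTokA p.2
    else if pvWhite c then pvTokA rest
    else
      let p := pvScanLabel rest
      ("LABEL", String.mk (c :: p.1)) :: pvTokA p.2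
termination_by l => l.length
decreasing_by
  · simp
  · have := pvScanQuote_len rest; simpa using Nat.lt_succ_of_le this
  · simp
  · have := pvScanLabel_len rest; simpa using Nat.lt_succ_of_le this

def tokenize_newick (s : String) : List (String × String) :=
  let t := PySem.Chars.strip s.toList
  let t := if PySem.Chars.endswith t [';'] then t else t ++ [';']
  pvTokA t

-- ===== PORT B =====
inductive PvMode
  | top
  | quote : List Char → PvMode
  | label : List Char → PvMode

def pvStep : List (String × String) × PvMode → Char → List (String × String) × PvMode
  | (acc, PvMode.top), c =>
    if pvPunct c then (acc ++ [(c.toString, c.toString)], PvMode.top)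
    else if c = '\'' then (acc, PvMode.quote [])
    else if pvWhite c then (acc, PvMode.top)
    else (acc, PvMode.label [c])
  | (acc, PvMode.quote b), c =>
    if c = '\'' then (acc ++ [("LABEL", String.mk b)], PvMode.top)
    else (acc, PvMode.quote (b ++ [c]))
  | (acc, PvMode.label b), c =>
    if pvPunct c then (acc ++ [("LABEL", String.mk b), (c.toString, c.toString)], PvMode.top)
    else if pvWhite c then (acc ++ [("LABEL", String.mk b)], PvMode.top)
    else (acc, PvMode.label (b ++ [c]))

def pvFinish : List (String × String) × PvMode → List (String × String)
  | (acc, PvMode.top) => acc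
  | (acc, PvMode.quote b) => acc ++ [("LABEL", String.mk b)]
  | (acc, PvMode.label b) => acc ++ [("LABEL", String.mk b)]

def tokenize_newick_alt (s : String) : List (String × String) :=
  let t := PySem.Chars.strip s.toList
  let t := if PySem.Chars.endswith t [';'] then t else t ++ [';']
  pvFinish (t.foldl pvStep ([], PvMode.top))

-- ===== PRECONDITION & SPEC =====
def Spec_tokenize_newick (s : String) (out : List (String × String)) : Prop := out = tokenize_newick_alt s
instance (s : String) (out : List (String × String)) : Decidable (Spec_tokenize_newick s out) := by unfold Spec_tokenize_newick; infer_instance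

-- ===== CLAIM (what is proved, stated in full; the proofs are below) =====
def Claim_equal_tokenize_newick : Prop := ∀ (s : String), Dom_tokenize_newick s → Spec_tokenize_newick s (tokenize_newick s)

-- ===== LEMMAS AND PROOFS =====

-- the state-machine invariant: from each mode, finishing the fold produces A's remaining tokens
theorem pvMain : ∀ cs : List Char,
    (∀ acc, pvFinish (cs.foldl pvStep (acc, PvMode.top)) = acc ++ pvTokA cs) ∧
    (∀ acc b, pvFinish (cs.foldl pvStep (acc, PvMode.quote b)) =
        acc ++ ("LABEL", String.mk (b ++ (pvScanQuote cs).1)) :: pvTokA (pvScanQuote cs).2) ∧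
    (∀ acc b, pvFinish (cs.foldl pvStep (acc, PvMode.label b)) =
        acc ++ ("LABEL", String.mk (b ++ (pvScanLabel cs).1)) :: pvTokA (pvScanLabel cs).2) := by
  intro cs
  induction cs with
  | nil =>
    refine ⟨?_, ?_, ?_⟩ <;> intros <;>
      simp [pvFinish, pvTokA, pvScanQuote, pvScanLabel]
  | cons c rest ih =>
    obtain ⟨ih1, ih2, ih3⟩ := ih
    refine ⟨?_, ?_, ?_⟩
    · intro acc
      by_cases hp : pvPunct c = true
      · rw [pvTokA]
        simp only [List.foldl_cons, pvStep, hp, if_pos, if_true]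
        rw [ih1]; simp
      · by_cases hq : c = '\''
        · subst hq
          rw [pvTokA]
          simp only [List.foldl_cons, pvStep, hp]
          simp only [Bool.false_eq_true, if_false, reduceIte]
          rw [ih2]; simp
        · by_cases hw : pvWhite c = true
          · rw [pvTokA]
            simp only [List.foldl_cons, pvStep, hp, hq, hw, if_true, if_false, Bool.false_eq_true]
            rw [ih1]
          · rw [pvTokA]
            simp only [List.foldl_cons, pvStep, hp, hq, hw, if_false, Bool.false_eq_true]
            rw [ih3]; simp
    · intro acc b
      by_cases hq : c = '\''
      · simp only [List.foldl_cons, pvStep, hq, if_true, pvScanQuote]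
        rw [ih1]; simp
      · simp only [List.foldl_cons, pvStep, hq, if_false, pvScanQuote]
        rw [ih2]; simp
    · intro acc b
      by_cases hp : pvPunct c = true
      · simp only [List.foldl_cons, pvStep, hp, if_true, pvScanLabel, Bool.true_or]
        rw [ih1, pvTokA]
        simp [hp]
      · by_cases hw : pvWhite c = true
        · simp only [List.foldl_cons, pvStep, hp, hw, if_true, if_false, Bool.false_eq_true,
            pvScanLabel, Bool.false_or]
          rw [ih1, pvTokA]
          have hq : c ≠ '\'' := by
            intro h; subst h; simp [pvWhite] at hw
          simp [hp, hq, hw]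
        · simp only [List.foldl_cons, pvStep, hp, hw, if_false, Bool.false_eq_true, pvScanLabel,
            Bool.or_self, Bool.false_or]
          rw [ih3]; simp

-- ===== VERDICT (by name: the statement is the Claim_ definition above) =====
theorem tokenize_newick_spec : Claim_equal_tokenize_newick := by
  intro s _
  unfold Spec_tokenize_newick tokenize_newick tokenize_newick_alt
  have h := (pvMain (if PySem.Chars.endswith (PySem.Chars.strip s.toList) [';']
      then PySem.Chars.strip s.toList else PySem.Chars.strip s.toList ++ [';'])).1 []
  simpa using h.symm
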